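-- pv_equiv track=rewrite | github.com/domjanbaric/vista | src/clustering.py | making_base
-- ===== SOURCE A (Python) =====
-- def making_base(iterations_list):  #Out of iteration_list returns list with elements that connected together, out of that list we make a forest
--     not_connected = []
--     trees_base = []
--     is_last_iteration = 1
--     for i in reversed(iterations_list):
--         for j in i:
--             if is_last_iteration == 1 and len(j) == 1:
--                 not_connected.append(j[0])
--             elif is_last_iteration == 1:
--                 trees_base.append([j])
--             elif (j[0] not in not_connected):
--                 for q in trees_base:
--                     if (set(j) & set(q[0]) and not any(j == sublist for sublist in q)):
--                         q.append(j)
--         is_last_iteration = 0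
--     return trees_base,not_connected
-- ===== SOURCE B (Python) =====
-- def making_base(iterations_list):
--     # Inverted index element -> anchor-tree indices: each later element is
--     # routed only to its candidate trees, with per-tree seen-sets for the
--     # duplicate check (no per-(element, tree) scan of all trees).
--     if not iterations_list:
--         return [], []
--     last = iterations_list[-1]
--     rest = iterations_list[:-1]
--     not_connected = [j[0] for j in last if len(j) == 1]
--     nc = set(not_connected)
--     anchors = [j for j in last if len(j) != 1]
--     index = {}
--     for t, a in enumerate(anchors):
--         for v in a:
--             index.setdefault(v, []).append(t)
--     trees = [[a] for a in anchors]
--     seen = [{tuple(a)} for a in anchors]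
--     for lvl in reversed(rest):
--         for j in lvl:
--             if j[0] in nc:
--                 continue
--             cand = set()
--             for v in j:
--                 cand.update(index.get(v, ()))
--             tj = tuple(j)
--             for t in sorted(cand):
--                 if tj not in seen[t]:
--                     trees[t].append(j)
--                     seen[t].add(tj)
--     return trees, not_connected
-- ===== Notes on version B (the rewrite author's own statement) =====
-- stated objective: alternative
-- what changed: A scans every tree for every later element (rebuilding Python sets per (element, tree) pair and rescanning the growing tree for duplicates); B instead builds an inverted index from element value to anchor-tree indices once and routes each later element only to its candidate trees (union of index lookups), with per-tree seen-sets for the duplicate check.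
import Mathlib
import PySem

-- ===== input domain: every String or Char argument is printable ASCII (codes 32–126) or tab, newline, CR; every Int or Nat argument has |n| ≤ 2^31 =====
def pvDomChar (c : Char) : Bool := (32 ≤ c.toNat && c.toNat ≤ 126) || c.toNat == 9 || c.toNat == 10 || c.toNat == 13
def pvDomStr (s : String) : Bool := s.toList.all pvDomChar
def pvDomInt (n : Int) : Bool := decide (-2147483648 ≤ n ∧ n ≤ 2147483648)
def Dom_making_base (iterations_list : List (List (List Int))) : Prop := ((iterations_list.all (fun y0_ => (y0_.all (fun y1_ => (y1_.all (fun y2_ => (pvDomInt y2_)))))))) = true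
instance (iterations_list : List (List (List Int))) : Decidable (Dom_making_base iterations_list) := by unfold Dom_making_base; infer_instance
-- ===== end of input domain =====

-- B replaces A's scan of every tree for every later element by an inverted index
-- element-value → anchor-tree indices built once: each later element is routed only to its
-- candidate trees, with a per-tree seen-set for the duplicate check (objective: alternative).

-- ===== PORT A =====
-- 'set(j) & set(q[0])' truthiness = non-empty intersection (exact); 'q[0]' ported as headD []
-- (every element of trees_base is built non-empty, so exact); 'any(j == sublist for sublist in q)'.
def mbUpd (j : List Int) (q : List (List Int)) : List (List Int) :=
  if !(PySem.Set.inter (PySem.Set.ofList j) (PySem.Set.ofList (q.headD []))).isEmpty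
      && !(q.any (fun s => s == j))
  then q ++ [j] else q

-- body of 'for j in i' at flag value is_last_iteration; 'j[0]' ported as headD 0 (exact under
-- Pre_making_base: j is non-empty wherever Python evaluates j[0])
def mbInner (flag : Int) (p : List (List (List Int)) × List Int) (j : List Int) :
    List (List (List Int)) × List Int :=
  if flag == 1 && j.length == 1 then (p.1, p.2 ++ [j.headD 0])
  else if flag == 1 then (p.1 ++ [[j]], p.2)
  else if !(p.2.contains (j.headD 0)) then (p.1.map (mbUpd j), p.2)
  else p

-- body of 'for i in reversed(iterations_list)'; state (trees_base, not_connected, is_last_iteration)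
def mbOuter (st : List (List (List Int)) × List Int × Int) (i : List (List Int)) :
    List (List (List Int)) × List Int × Int :=
  let p := i.foldl (mbInner st.2.2) (st.1, st.2.1)
  (p.1, p.2, 0)

def making_base (iterations_list : List (List (List Int))) :
    List (List (List Int)) × List Int :=
  let st := iterations_list.reverse.foldl mbOuter ([], [], 1)
  (st.1, st.2.1)

-- ===== PORT B =====
-- inverted index: 'for t, a in enumerate(anchors): for v in a: index.setdefault(v, []).append(t)'
def mbIndex (anchors : List (List Int)) : PySem.Dict Int (List Nat) :=
  anchors.zipIdx.foldl
    (fun d p => p.1.foldl (fun d v => d.insert v (d.getD v [] ++ [p.2])) d)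
    PySem.Dict.empty

-- 'cand = set(); for v in j: cand.update(index.get(v, ())); sorted(cand)'
def mbCand (index : PySem.Dict Int (List Nat)) (j : List Int) : List Nat :=
  PySem.List.sorted
    (j.foldl (fun s v => PySem.Set.update s (index.getD v [])) PySem.Set.empty)
    (fun t => t) false

-- 'for t in sorted(cand): if tj not in seen[t]: trees[t].append(j); seen[t].add(tj)'
-- (the Python parallel lists trees/seen are carried as one list of pairs)
def mbStep (index : PySem.Dict Int (List Nat))
    (ts : List (List (List Int) × PySem.Set (List Int))) (j : List Int) :
    List (List (List Int) × PySem.Set (List Int)) :=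
  (mbCand index j).foldl
    (fun ts t => ts.modify t (fun p =>
      if PySem.Set.contains p.2 j then p else (p.1 ++ [j], PySem.Set.add p.2 j)))
    ts

def making_base_alt (iterations_list : List (List (List Int))) :
    List (List (List Int)) × List Int :=
  if iterations_list.isEmpty then ([], [])
  else
    let last := iterations_list.getLastD []
    let rest := iterations_list.dropLast
    let not_connected := (last.filter (fun j => j.length == 1)).map (fun j => j.headD 0)
    let nc : PySem.Set Int := PySem.Set.ofList not_connected
    let anchors := last.filter (fun j => !(j.length == 1))
    let index := mbIndex anchors
    let ts0 := anchors.map (fun a => ([a], PySem.Set.ofList [a]))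
    let tsF := rest.reverse.foldl
      (fun ts lvl => lvl.foldl
        (fun ts j => if PySem.Set.contains nc (j.headD 0) then ts else mbStep index ts j)
        ts)
      ts0
    (tsF.map (·.1), not_connected)

-- ===== PRECONDITION & SPEC =====
-- Pre_ excludes inputs where some sublist of a non-last iteration is empty: there Python A
-- raises IndexError on j[0] (and B raises the same way).
def Pre_making_base (iterations_list : List (List (List Int))) : Prop :=
  ∀ lvl ∈ iterations_list.dropLast, ∀ j ∈ lvl, j ≠ []
instance (iterations_list : List (List (List Int))) : Decidable (Pre_making_base iterations_list) := by
  unfold Pre_making_base; infer_instance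
def pvWitness_making_base : List (List (List Int)) :=
  [[[1, 2], [3, 4]], [[1, 5], [6], [2, 7]]]
def Spec_making_base (iterations_list : List (List (List Int))) (out : List (List (List Int)) × List Int) : Prop := out = making_base_alt iterations_list
instance (iterations_list : List (List (List Int))) (out : List (List (List Int)) × List Int) : Decidable (Spec_making_base iterations_list out) := by unfold Spec_making_base; infer_instance

-- ===== CLAIM (what is proved, stated in full; the proofs are below) =====
def Claim_equal_making_base : Prop := ∀ (iterations_list : List (List (List Int))), Dom_making_base iterations_list → Pre_making_base iterations_list → Spec_making_base iterations_list (making_base iterations_list)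

-- ===== LEMMAS AND PROOFS =====

-- A's per-pair condition: the two trees/pairs evolve in lockstep (A keeps the tree as a list
-- and rescans it; B keeps the tree with its member set)
def mbPairStep (p : List (List Int) × PySem.Set (List Int)) (j : List Int) :
    List (List Int) × PySem.Set (List Int) :=
  if !(PySem.Set.isdisjoint (PySem.Set.ofList (p.1.headD [])) j)
      && !(PySem.Set.contains p.2 j)
  then (p.1 ++ [j], PySem.Set.add p.2 j) else p

-- ---- A-side normal form ----

lemma mbInner_one (last : List (List Int)) :
    ∀ (ts : List (List (List Int))) (ns : List Int),
    last.foldl (mbInner 1) (ts, ns)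
      = (ts ++ (last.filter (fun j => !(j.length == 1))).map (fun j => [j]),
         ns ++ (last.filter (fun j => j.length == 1)).map (fun j => j.headD 0)) := by
  induction last with
  | nil => simp
  | cons j rest ih =>
    intro ts ns
    by_cases h : j.length = 1
    · simp [mbInner, h, ih, List.append_assoc]
    · simp [mbInner, h, ih, List.append_assoc]

lemma mbInner_zero (i : List (List Int)) :
    ∀ (ts : List (List (List Int))) (ns : List Int),
    i.foldl (mbInner 0) (ts, ns)
      = ((i.filter (fun j => !(ns.contains (j.headD 0)))).foldl
           (fun ts j => ts.map (mbUpd j)) ts, ns) := by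
  induction i with
  | nil => simp
  | cons j rest ih =>
    intro ts ns
    by_cases h : j.head?.getD 0 ∈ ns
    · simp [mbInner, h, ih]
    · simp [mbInner, h, ih]

lemma mbOuter_zero (lvls : List (List (List Int))) :
    ∀ (ts : List (List (List Int))) (ns : List Int),
    lvls.foldl mbOuter (ts, ns, 0)
      = ((lvls.flatMap (fun i => i.filter (fun j => !(ns.contains (j.headD 0))))).foldl
           (fun ts j => ts.map (mbUpd j)) ts, ns, 0) := by
  induction lvls with
  | nil => simp
  | cons i rest ih =>
    intro ts ns
    simp only [List.foldl_cons, List.flatMap_cons, List.foldl_append, mbOuter, mbInner_zero, ih]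

-- loop interchange: per-j map over all trees = independent per-tree fold
lemma foldl_map_comm (js : List (List Int)) :
    ∀ (ts : List (List (List Int))),
    js.foldl (fun ts j => ts.map (mbUpd j)) ts
      = ts.map (fun q => js.foldl (fun q j => mbUpd j q) q) := by
  induction js with
  | nil => simp
  | cons j rest ih =>
    intro ts
    simp [ih, List.map_map, Function.comp_def]

-- A's per-tree growth (list rescans) equals the lockstep pair evolution
lemma pair_eq (js : List (List Int)) :
    ∀ (t : List (List Int)) (m : PySem.Set (List Int)), (∀ x, x ∈ m ↔ x ∈ t) →
    js.foldl (fun q j => mbUpd j q) t = (js.foldl mbPairStep (t, m)).1 := by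
  induction js with
  | nil => simp
  | cons j rest ih =>
    intro t m hm
    have e1 : (PySem.Set.inter (PySem.Set.ofList j) (PySem.Set.ofList (t.headD []))).isEmpty
        = PySem.Set.isdisjoint (PySem.Set.ofList (t.headD [])) j := by
      rw [Bool.eq_iff_iff, List.isEmpty_iff, List.eq_nil_iff_forall_not_mem,
        PySem.Set.isdisjoint_iff]
      simp only [PySem.Set.mem_inter, PySem.Set.mem_ofList]
      tauto
    have e2 : (t.any (fun s => s == j)) = PySem.Set.contains m j := by
      rw [Bool.eq_iff_iff, PySem.Set.contains_iff, hm, List.any_eq_true]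
      simp
    simp only [List.foldl_cons, mbUpd, mbPairStep, e1, e2]
    by_cases hc : (!PySem.Set.isdisjoint (PySem.Set.ofList (t.headD [])) j
        && !PySem.Set.contains m j) = true
    · rw [if_pos hc, if_pos hc]
      exact ih (t ++ [j]) (PySem.Set.add m j)
        (by intro x; rw [PySem.Set.mem_add, hm]; simp)
    · rw [if_neg hc, if_neg hc]
      exact ih t m hm

-- ---- inverted-index characterisation ----

lemma idx_inner (k : Nat) (v : Int) (t : Nat) (vs : List Int) :
    ∀ (d : PySem.Dict Int (List Nat)),
    t ∈ (vs.foldl (fun d v => d.insert v (d.getD v [] ++ [k])) d).getD v []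
      ↔ t ∈ d.getD v [] ∨ (t = k ∧ v ∈ vs) := by
  induction vs with
  | nil => simp
  | cons v0 rest ih =>
    intro d
    rw [List.foldl_cons, ih]
    rw [PySem.Dict.getD_insert]
    by_cases h : v = v0
    · subst h
      simp
      tauto
    · simp only [if_neg h, List.mem_cons]
      tauto

lemma idx_outer (v : Int) (t : Nat) (l : List (List Int)) :
    ∀ (k : Nat) (d : PySem.Dict Int (List Nat)),
    t ∈ ((l.zipIdx k).foldl
          (fun d p => p.1.foldl (fun d v => d.insert v (d.getD v [] ++ [p.2])) d) d).getD v []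
      ↔ t ∈ d.getD v [] ∨ ∃ i, ∃ _ : i < l.length, t = k + i ∧ v ∈ l[i] := by
  induction l with
  | nil => simp
  | cons a l ih =>
    intro k d
    rw [List.zipIdx_cons, List.foldl_cons, ih, idx_inner]
    constructor
    · rintro (⟨h | ⟨rfl, hv⟩⟩ | ⟨i, hi, rfl, hv⟩)
      · exact Or.inl h
      · exact Or.inr ⟨0, by simp, by simp, by simpa using hv⟩
      · exact Or.inr ⟨i + 1, by simpa using hi, by omega, by simpa using hv⟩
    · rintro (h | ⟨i, hi, rfl, hv⟩)
      · exact Or.inl (Or.inl h)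
      · cases i with
        | zero => exact Or.inl (Or.inr ⟨by omega, by simpa using hv⟩)
        | succ i =>
          exact Or.inr ⟨i, by simpa using hi, by omega, by simpa using hv⟩

lemma idx_char (anchors : List (List Int)) (v : Int) (t : Nat) :
    t ∈ (mbIndex anchors).getD v [] ↔ ∃ _ : t < anchors.length, v ∈ anchors[t] := by
  unfold mbIndex
  rw [show anchors.zipIdx = anchors.zipIdx 0 from rfl, idx_outer]
  simp only [PySem.Dict.getD, PySem.Dict.empty]
  constructor
  · rintro (h | ⟨i, hi, heq, hv⟩)
    · simp [PySem.Dict.get?] at h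
    · have hti : t = i := by omega
      subst hti
      exact ⟨hi, hv⟩
  · rintro ⟨ht, hv⟩
    exact Or.inr ⟨t, ht, by omega, hv⟩

-- ---- candidate set ----

lemma cand_mem (index : PySem.Dict Int (List Nat)) (j : List Int) (t : Nat) :
    t ∈ mbCand index j ↔ ∃ v ∈ j, t ∈ index.getD v [] := by
  unfold mbCand
  rw [PySem.List.mem_sorted]
  suffices h : ∀ (s : PySem.Set Nat),
      t ∈ j.foldl (fun s v => PySem.Set.update s (index.getD v [])) s
        ↔ t ∈ s ∨ ∃ v ∈ j, t ∈ index.getD v [] by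
    rw [h]; simp [PySem.Set.empty]
  induction j with
  | nil => simp
  | cons v rest ih =>
    intro s
    rw [List.foldl_cons, ih, PySem.Set.mem_update]
    simp only [List.mem_cons]
    constructor
    · rintro ((h | h) | ⟨v', hv', h⟩)
      · exact Or.inl h
      · exact Or.inr ⟨v, Or.inl rfl, h⟩
      · exact Or.inr ⟨v', Or.inr hv', h⟩
    · rintro (h | ⟨v', (rfl | hv'), h⟩)
      · exact Or.inl (Or.inl h)
      · exact Or.inl (Or.inr h)
      · exact Or.inr ⟨v', hv', h⟩

lemma cand_nodup (index : PySem.Dict Int (List Nat)) (j : List Int) :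
    (mbCand index j).Nodup := by
  unfold mbCand
  refine (PySem.List.sorted_perm _ _ _).nodup_iff.mpr ?_
  suffices h : ∀ (s : PySem.Set Nat), s.Nodup →
      (j.foldl (fun s v => PySem.Set.update s (index.getD v [])) s).Nodup by
    exact h _ List.nodup_nil
  induction j with
  | nil => intro s hs; simpa using hs
  | cons v rest ih =>
    intro s hs
    exact ih _ (PySem.Set.nodup_update _ _ hs)

-- ---- the modify-loop over a duplicate-free index list, position by position ----

lemma foldl_modify_length {α : Type} (f : α → α) (S : List Nat) :
    ∀ (l : List α), (S.foldl (fun l t => l.modify t f) l).length = l.length := by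
  induction S with
  | nil => simp
  | cons t S ih => intro l; rw [List.foldl_cons, ih, List.length_modify]

lemma foldl_modify_getElem {α : Type} (f : α → α) (S : List Nat) (hS : S.Nodup) :
    ∀ (l : List α) (i : Nat) (h : i < l.length)
      (h2 : i < (S.foldl (fun l t => l.modify t f) l).length),
    (S.foldl (fun l t => l.modify t f) l)[i] = if i ∈ S then f l[i] else l[i] := by
  induction S with
  | nil => simp
  | cons t S ih =>
    intro l i h h2
    simp only [List.foldl_cons] at h2 ⊢
    rw [ih hS.of_cons _ i (by rwa [List.length_modify]) h2]
    rw [List.getElem_modify]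
    rcases List.nodup_cons.mp hS with ⟨htS, _⟩
    by_cases hiS : i ∈ S
    · have : t ≠ i := fun e => htS (e ▸ hiS)
      simp [hiS, this]
    · by_cases hit : t = i
      · simp [hiS, hit]
      · have hit' : ¬ i = t := fun e => hit e.symm
        simp [hiS, hit, hit']

-- one element routed through the index = the lockstep pair step applied to every tree
lemma step_map (index : PySem.Dict Int (List Nat)) (anchors : List (List Int))
    (hidx : ∀ (v : Int) (t : Nat),
      t ∈ index.getD v [] ↔ ∃ _ : t < anchors.length, v ∈ anchors[t])
    (ts : List (List (List Int) × PySem.Set (List Int)))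
    (hlen : ts.length = anchors.length)
    (hhead : ∀ (t : Nat) (h : t < ts.length), ts[t].1.headD [] = anchors[t]'(hlen ▸ h))
    (j : List Int) :
    mbStep index ts j = ts.map (fun p => mbPairStep p j) := by
  apply List.ext_getElem
  · rw [List.length_map]; exact foldl_modify_length _ _ ts
  · intro i h1 h2
    unfold mbStep
    rw [foldl_modify_getElem _ _ (cand_nodup index j) ts i (by simpa using h2) h1]
    rw [List.getElem_map]
    have hi : i < ts.length := by simpa using h2
    have hcand : i ∈ mbCand index j
        ↔ (!(PySem.Set.isdisjoint (PySem.Set.ofList (ts[i].1.headD [])) j)) = true := by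
      rw [cand_mem, hhead i hi]
      simp only [Bool.not_eq_eq_eq_not, Bool.not_true, ← Bool.not_eq_true,
        PySem.Set.isdisjoint_iff]
      constructor
      · rintro ⟨v, hvj, hv⟩
        rw [hidx] at hv
        rcases hv with ⟨_, hva⟩
        intro hdisj
        exact hdisj _ (by simpa [PySem.Set.mem_ofList] using hva) hvj
      · intro hnd
        simp only [not_forall, not_not] at hnd
        rcases hnd with ⟨v, hvs, hvj⟩
        exact ⟨v, hvj, (hidx v i).mpr ⟨hlen ▸ hi, by simpa [PySem.Set.mem_ofList] using hvs⟩⟩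
    by_cases hc : i ∈ mbCand index j
    · rw [if_pos hc]
      have hd : PySem.Set.isdisjoint (PySem.Set.ofList (ts[i].1.headD [])) j = false := by
        cases hh : PySem.Set.isdisjoint (PySem.Set.ofList (ts[i].1.headD [])) j
        · rfl
        · have hcc := hcand.mp hc
          rw [hh] at hcc
          simp at hcc
      show (if PySem.Set.contains ts[i].2 j = true then ts[i]
            else (ts[i].1 ++ [j], PySem.Set.add ts[i].2 j)) = mbPairStep ts[i] j
      unfold mbPairStep
      rw [hd]
      cases hm : PySem.Set.contains ts[i].2 j <;> simp
    · rw [if_neg hc]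
      have hd : PySem.Set.isdisjoint (PySem.Set.ofList (ts[i].1.headD [])) j = true := by
        cases hh : PySem.Set.isdisjoint (PySem.Set.ofList (ts[i].1.headD [])) j
        · exact absurd (hcand.mpr (by rw [hh]; rfl)) hc
        · rfl
      show ts[i] = mbPairStep ts[i] j
      unfold mbPairStep
      rw [hd]
      simp

-- the whole later-element stream: index-routed updates = independent lockstep evolution
lemma b_fold (index : PySem.Dict Int (List Nat)) (anchors : List (List Int))
    (hidx : ∀ (v : Int) (t : Nat),
      t ∈ index.getD v [] ↔ ∃ _ : t < anchors.length, v ∈ anchors[t])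
    (stream : List (List Int)) :
    ∀ (ts : List (List (List Int) × PySem.Set (List Int)))
      (hlen : ts.length = anchors.length),
      (∀ (t : Nat) (h : t < ts.length), ts[t].1 ≠ []) →
      (∀ (t : Nat) (h : t < ts.length), ts[t].1.headD [] = anchors[t]'(hlen ▸ h)) →
    stream.foldl (mbStep index) ts = ts.map (fun p => stream.foldl mbPairStep p) := by
  induction stream with
  | nil => intro ts _ _ _; simp
  | cons j rest ih =>
    intro ts hlen hne hhead
    rw [List.foldl_cons, step_map index anchors hidx ts hlen hhead j]
    rw [ih (ts.map (fun p => mbPairStep p j)) (by simpa using hlen) ?hne ?hhead]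
    · simp [List.map_map, Function.comp_def]
    case hne =>
      intro t h
      have ht : t < ts.length := by simpa using h
      simp only [List.getElem_map]
      unfold mbPairStep
      split
      · simp
      · exact hne t ht
    case hhead =>
      intro t h
      have ht : t < ts.length := by simpa using h
      simp only [List.getElem_map]
      have hne' := hne t ht
      unfold mbPairStep
      split
      · rcases List.exists_cons_of_ne_nil hne' with ⟨a, q, hq⟩
        simp only [hq, List.cons_append, List.headD_cons]
        rw [← hhead t ht, hq]; rfl
      · exact hhead t ht

-- ===== VERDICT (by name: the statement is the Claim_ definition above) =====
theorem making_base_spec : Claim_equal_making_base := by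
  intro L _ _
  unfold Spec_making_base
  by_cases hL : L = []
  · subst hL; rfl
  · have hrev : L.reverse = L.getLast hL :: L.dropLast.reverse := by
      conv_lhs => rw [← List.dropLast_concat_getLast hL]
      simp
    have hlastD : L.getLastD [] = L.getLast hL := by
      simp [List.getLastD_eq_getLast?, List.getLast?_eq_getLast_of_ne_nil hL]
    have hne : L.isEmpty = false := by simp [hL]
    set last := L.getLast hL with hlast
    set rest := L.dropLast with hrest
    set nc : List Int := (last.filter (fun j => j.length == 1)).map (fun j => j.headD 0) with hnc
    set anchors := last.filter (fun j => !(j.length == 1)) with hanch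
    have hfilter : (fun (lvl : List (List Int)) => lvl.filter (fun j => !(nc.contains (j.headD 0))))
        = (fun lvl => lvl.filter (fun j => !(PySem.Set.contains (PySem.Set.ofList nc) (j.headD 0)))) := by
      funext lvl
      apply List.filter_congr
      intro j _
      congr 1
      rw [Bool.eq_iff_iff]
      simp [PySem.Set.mem_ofList]
    set stream := rest.reverse.flatMap
      (fun lvl => lvl.filter (fun j => !(PySem.Set.contains (PySem.Set.ofList nc) (j.headD 0)))) with hstream
    have h1 : mbOuter ([], [], 1) last = (anchors.map (fun j => [j]), nc, 0) := by
      show (let p := last.foldl (mbInner 1) ([], []); (p.1, p.2, (0 : Int))) = _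
      simp only [mbInner_one]
      rfl
    have hA : making_base L
        = (anchors.map (fun a => stream.foldl (fun q j => mbUpd j q) [a]), nc) := by
      simp only [making_base, hrev, List.foldl_cons, h1, mbOuter_zero, hfilter, ← hstream,
        foldl_map_comm, List.map_map]
      rfl
    -- B side: collapse the two loops into one fold over the same filtered stream
    have hflip : (fun (ts : List (List (List Int) × PySem.Set (List Int))) (j : List Int) =>
          if PySem.Set.contains (PySem.Set.ofList nc) (j.headD 0) = true then ts
          else mbStep (mbIndex anchors) ts j)
        = (fun ts j =>
          if (!(PySem.Set.contains (PySem.Set.ofList nc) (j.headD 0))) = true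
          then mbStep (mbIndex anchors) ts j else ts) := by
      funext ts j
      cases h : PySem.Set.contains (PySem.Set.ofList nc) (j.headD 0) <;> simp
    have hB : making_base_alt L
        = ((stream.foldl (mbStep (mbIndex anchors))
              (anchors.map (fun a => ([a], PySem.Set.ofList [a])))).map (·.1), nc) := by
      simp only [making_base_alt, hne, Bool.false_eq_true, if_false, hlastD]
      rw [show (fun (ts : List (List (List Int) × PySem.Set (List Int))) (lvl : List (List Int)) =>
            lvl.foldl (fun ts j =>
              if PySem.Set.contains (PySem.Set.ofList nc) (j.headD 0) = true then ts
              else mbStep (mbIndex anchors) ts j) ts)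
          = (fun ts lvl => lvl.foldl (fun ts j =>
              if (!(PySem.Set.contains (PySem.Set.ofList nc) (j.headD 0))) = true
              then mbStep (mbIndex anchors) ts j else ts) ts) from by rw [hflip]]
      rw [← List.foldl_flatten, ← List.foldl_filter, List.filter_flatten, hstream,
        List.flatMap_def]
    rw [hA, hB]
    have hts0len : (anchors.map (fun a => ([a], PySem.Set.ofList [a]))).length = anchors.length := by
      simp
    rw [b_fold (mbIndex anchors) anchors (idx_char anchors) stream _ hts0len
      (by intro t h; simp) (by intro t h; simp)]
    rw [List.map_map, List.map_map]
    refine congrArg (fun ts => (ts, nc)) ?_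
    apply List.map_congr_left
    intro a _
    simp only [Function.comp_apply]
    exact pair_eq stream [a] (PySem.Set.ofList [a]) (by intro x; simp [PySem.Set.mem_ofList])
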